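-- pv_equiv track=rewrite | github.com/wccuiro/pxp_clock | transition_matrix_expvals.py | fibonacci_basis
-- ===== SOURCE A (Python) =====
-- def fibonacci_basis(L, pbc=False):
--   states = []
--   for i in range(1 << L):
--     if i & (i >> 1) == 0:
--       if 2**0 & i and 2**(L-1) & i:
--         continue
--       else:
--         states.append(i)
--   return states
-- ===== SOURCE B (Python) =====
-- def fibonacci_basis(L, pbc=False):
--     # Build S(n) = increasing list of n-bit integers with no two adjacent set bits
--     # via the Fibonacci recurrence S(n) = S(n-1) + [x + 2^(n-1) for x in S(n-2)],
--     # then drop the states with both the first and the last bit set.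
--     prev, cur = [0], [0, 1]          # S(0), S(1)
--     if L == 0:
--         return prev
--     for n in range(2, L + 1):
--         prev, cur = cur, cur + [x + (1 << (n - 1)) for x in prev]
--     hi = 1 << (L - 1)
--     return [x for x in cur if not (x & 1 and x & hi)]
-- ===== Notes on version B (the rewrite author's own statement) =====
-- stated objective: alternative
-- what changed: B replaces A's scan of all 2^L integers (testing each for adjacent set bits) by the Fibonacci recurrence S(n) = S(n-1) + [x + 2^(n-1) for x in S(n-2)], which generates exactly the valid states in increasing order and then drops the first-and-last-bit-set states in one pass; it does work proportional to the output size (phi^L) instead of 2^L, though both remain exponential in L.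
import Mathlib
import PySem

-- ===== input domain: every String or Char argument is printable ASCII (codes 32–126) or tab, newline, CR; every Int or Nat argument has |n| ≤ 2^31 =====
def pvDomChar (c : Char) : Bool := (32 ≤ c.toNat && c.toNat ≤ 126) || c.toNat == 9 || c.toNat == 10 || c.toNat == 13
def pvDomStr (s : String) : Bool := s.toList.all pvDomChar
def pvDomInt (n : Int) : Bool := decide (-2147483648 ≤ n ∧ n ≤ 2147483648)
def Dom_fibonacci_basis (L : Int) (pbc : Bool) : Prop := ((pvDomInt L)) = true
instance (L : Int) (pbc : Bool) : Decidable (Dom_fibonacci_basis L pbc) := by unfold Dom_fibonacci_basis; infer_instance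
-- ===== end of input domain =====

-- B builds the valid states directly by the Fibonacci recurrence instead of scanning all
-- 2^L integers (objective: alternative algorithm, work proportional to the output size).

-- ===== PORT A =====
-- 'range(1 << L)': Python raises for L < 0 (excluded by Pre_); the guard only totalises the shift.
def fibonacci_basis (L : Int) (pbc : Bool) : List Int :=
  (PySem.List.pyRange 0 (if 0 ≤ L then (1 : Int) <<< L.toNat else 0) 1).foldl
    (fun states i =>
      if PySem.Int.band i (i >>> (1 : Nat)) = 0 then
        -- '2**(L-1)' is only evaluated by Python when '2**0 & i' is truthy, which forces L ≥ 1
        -- on inputs in Pre_; (L-1).toNat is exact there.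
        if PySem.Int.band (2 ^ (0 : Nat)) i ≠ 0 ∧ PySem.Int.band (2 ^ (L - 1).toNat) i ≠ 0 then
          states
        else
          states ++ [i]
      else states) []

-- ===== PORT B =====
def fibonacci_basis_alt (L : Int) (pbc : Bool) : List Int :=
  let pc : List Int × List Int := ([0], [0, 1])    -- (S(0), S(1))
  if L = 0 then pc.1
  else
    let pc := (PySem.List.pyRange 2 (L + 1) 1).foldl
      (fun (pc : List Int × List Int) n =>
        (pc.2, pc.2 ++ pc.1.map (fun x => x + (1 : Int) <<< (n - 1).toNat))) pc
    let hi := (1 : Int) <<< (L - 1).toNat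
    pc.2.filter (fun x =>
      !(decide (PySem.Int.band x 1 ≠ 0) && decide (PySem.Int.band x hi ≠ 0)))

-- ===== PRECONDITION & SPEC =====
-- Pre_ excludes exactly L < 0, where Python A raises ValueError ('negative shift count').
def Pre_fibonacci_basis (L : Int) (pbc : Bool) : Prop := 0 ≤ L
instance (L : Int) (pbc : Bool) : Decidable (Pre_fibonacci_basis L pbc) := by
  unfold Pre_fibonacci_basis; infer_instance

def pvWitness_fibonacci_basis : Int × Bool := (4, false)

def Spec_fibonacci_basis (L : Int) (pbc : Bool) (out : List Int) : Prop :=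
  out = fibonacci_basis_alt L pbc
instance (L : Int) (pbc : Bool) (out : List Int) : Decidable (Spec_fibonacci_basis L pbc out) := by
  unfold Spec_fibonacci_basis; infer_instance

-- ===== CLAIM (what is proved, stated in full; the proofs are below) =====
def Claim_equal_fibonacci_basis : Prop :=
  ∀ (L : Int) (pbc : Bool), Dom_fibonacci_basis L pbc → Pre_fibonacci_basis L pbc →
    Spec_fibonacci_basis L pbc (fibonacci_basis L pbc)

-- ===== LEMMAS AND PROOFS =====

def pvFibb (x : Nat) : Bool := x &&& (x >>> 1) == 0

theorem pvFibb_iff (x : Nat) :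
    pvFibb x = true ↔ ∀ k, ¬(x.testBit k = true ∧ x.testBit (k + 1) = true) := by
  unfold pvFibb
  rw [beq_iff_eq]
  constructor
  · intro h k hk
    have h2 := congrArg (fun y => Nat.testBit y k) h
    simp only [Nat.testBit_and, Nat.testBit_shiftRight, Nat.zero_testBit] at h2
    rw [Nat.add_comm 1 k] at h2
    rw [hk.1, hk.2] at h2
    simp at h2
  · intro h
    apply Nat.eq_of_testBit_eq
    intro k
    simp only [Nat.testBit_and, Nat.testBit_shiftRight, Nat.zero_testBit]
    have hh := h k
    rw [Nat.add_comm 1 k]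
    cases h1 : x.testBit k <;> cases h2 : x.testBit (k + 1) <;> simp_all

theorem pv_testBit_high {x j n : Nat} (hx : x < 2 ^ n) (hj : n ≤ j) : x.testBit j = false :=
  Nat.testBit_lt_two_pow (Nat.lt_of_lt_of_le hx (Nat.pow_le_pow_right (by norm_num) hj))

theorem pvFibb_add_pow (n x : Nat) (hx : x < 2 ^ (n + 1)) :
    pvFibb (2 ^ (n + 1) + x) = (decide (x < 2 ^ n) && pvFibb x) := by
  have hbit : ∀ j, (2 ^ (n + 1) + x).testBit j =
      (if j = n + 1 then true else if j < n + 1 then x.testBit j else false) := by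
    intro j
    rcases lt_trichotomy j (n + 1) with h | h | h
    · simp [Nat.testBit_two_pow_add_gt h, h, Nat.ne_of_lt h]
    · subst h; simp [Nat.testBit_two_pow_add_eq, pv_testBit_high hx (le_refl _)]
    · have hlt2 : 2 ^ (n + 1) + x < 2 ^ j := by
        calc 2 ^ (n + 1) + x < 2 ^ (n + 1) + 2 ^ (n + 1) := by omega
        _ = 2 ^ (n + 2) := by ring
        _ ≤ 2 ^ j := Nat.pow_le_pow_right (by norm_num) (by omega)
      have h2 : ¬ j = n + 1 := by omega
      have h3 : ¬ j < n + 1 := by omega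
      simp [h2, h3, Nat.testBit_lt_two_pow hlt2]
  rcases Bool.eq_false_or_eq_true (decide (x < 2 ^ n) && pvFibb x) with hrhs | hrhs
  all_goals rw [hrhs]
  · rw [Bool.and_eq_true] at hrhs
    obtain ⟨hlt, hfibx⟩ := hrhs
    have hlt : x < 2 ^ n := by simpa using hlt
    rw [pvFibb_iff] at hfibx ⊢
    intro k hk
    have g1 := hk.1
    have g2 := hk.2
    rw [hbit] at g1 g2
    by_cases c3 : k + 1 = n + 1
    · rw [if_neg (by omega), if_pos (by omega)] at g1
      rw [show k = n by omega] at g1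
      exact absurd g1 (by simp [pv_testBit_high hlt (le_refl n)])
    · by_cases c4 : k + 1 < n + 1
      · rw [if_neg (by omega), if_pos (by omega)] at g1
        rw [if_neg c3, if_pos c4] at g2
        exact hfibx k ⟨g1, g2⟩
      · rw [if_neg c3, if_neg c4] at g2
        exact absurd g2 (by simp)
  · -- RHS false: show LHS false
    rw [Bool.and_eq_false_iff] at hrhs
    apply Bool.eq_false_iff.mpr
    intro hfib
    rw [pvFibb_iff] at hfib
    rcases hrhs with hlt | hnf
    · have hge : 2 ^ n ≤ x := by simpa using hlt
      have hbn : x.testBit n = true := Nat.testBit_of_two_pow_le_and_two_pow_add_one_gt hge hx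
      exact hfib n ⟨by rw [hbit]; simp [hbn, (by omega : ¬ n = n + 1), (by omega : n < n + 1)],
                    by rw [hbit]; simp⟩
    · rw [Bool.eq_false_iff] at hnf
      apply hnf
      rw [pvFibb_iff]
      intro k hk
      have hk1 : x.testBit k = true := hk.1
      have hk2 : x.testBit (k + 1) = true := hk.2
      have hb2 : k + 1 ≤ n := by
        by_contra hc
        rcases Nat.lt_or_ge (k + 1) (n + 1) with h | h
        · omega
        · exact absurd hk2 (by simp [pv_testBit_high hx h])
      exact hfib k ⟨by rw [hbit]; simp [hk1, (by omega : ¬ k = n + 1), (by omega : k < n + 1)],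
                    by rw [hbit]; simp [hk2, (by omega : ¬ k + 1 = n + 1), (by omega : k + 1 < n + 1)]⟩

def pvT (n : Nat) : List Nat := (List.range (2 ^ n)).filter pvFibb

theorem pv_filter_lt (n : Nat) :
    (List.range (2 ^ (n + 1))).filter (fun x => decide (x < 2 ^ n) && pvFibb x)
      = pvT n := by
  unfold pvT
  rw [show 2 ^ (n + 1) = 2 ^ n + 2 ^ n by ring, List.range_add, List.filter_append]
  have h1 : (List.range (2 ^ n)).filter (fun x => decide (x < 2 ^ n) && pvFibb x)
      = (List.range (2 ^ n)).filter pvFibb := by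
    apply List.filter_congr
    intro x hx
    simp [List.mem_range.mp hx]
  have h2 : ((List.range (2 ^ n)).map (fun x => 2 ^ n + x)).filter
      (fun x => decide (x < 2 ^ n) && pvFibb x) = [] := by
    rw [List.filter_eq_nil_iff]
    intro a ha
    obtain ⟨k, _, rfl⟩ := List.mem_map.mp ha
    simp [(by omega : ¬ 2 ^ n + k < 2 ^ n)]
  rw [h1, h2, List.append_nil]

theorem pvT_rec (n : Nat) :
    pvT (n + 2) = pvT (n + 1) ++ (pvT n).map (fun x => x + 2 ^ (n + 1)) := by
  unfold pvT
  rw [show 2 ^ (n + 2) = 2 ^ (n + 1) + 2 ^ (n + 1) by ring, List.range_add, List.filter_append]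
  congr 1
  rw [List.filter_map]
  have hcong : (List.range (2 ^ (n + 1))).filter (pvFibb ∘ fun x => 2 ^ (n + 1) + x)
      = (List.range (2 ^ (n + 1))).filter (fun x => decide (x < 2 ^ n) && pvFibb x) := by
    apply List.filter_congr
    intro x hx
    exact pvFibb_add_pow n x (List.mem_range.mp hx)
  rw [hcong, pv_filter_lt]
  apply List.map_congr_left
  intro a _
  exact Nat.add_comm _ _

theorem pv_shl_one (m : Nat) : (1 : Int) <<< m = ((2 ^ m : Nat) : Int) := by
  simp [Int.shiftLeft_eq]

theorem pv_band_pow_ne (x m : Nat) :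
    (PySem.Int.band ((2 : Int) ^ m) (x : Nat)) ≠ 0 ↔ x.testBit m = true := by
  have h : ((2 : Int) ^ m) = (((2 ^ m : Nat) : Int)) := by push_cast; ring
  rw [h, PySem.Int.band_natCast, ne_eq, Int.natCast_eq_zero, Nat.and_comm, Nat.and_two_pow]
  cases hb : x.testBit m <;> simp [hb, Nat.pos_iff_ne_zero, Nat.two_pow_pos]

theorem pvA_char (L : Int) (pbc : Bool) (hL : 0 ≤ L) :
    fibonacci_basis L pbc =
      ((pvT L.toNat).filter
        (fun x => !(x.testBit 0 && x.testBit (L - 1).toNat))).map Int.ofNat := by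
  unfold fibonacci_basis
  rw [if_pos hL, pv_shl_one, PySem.List.pyRange_zero_natCast]
  have hfun : (fun (states : List Int) (i : Int) =>
      if PySem.Int.band i (i >>> (1 : Nat)) = 0 then
        if PySem.Int.band (2 ^ (0 : Nat)) i ≠ 0 ∧ PySem.Int.band (2 ^ (L - 1).toNat) i ≠ 0 then
          states
        else states ++ [i]
      else states)
      = (fun (states : List Int) (i : Int) =>
          if (PySem.Int.band i (i >>> (1 : Nat)) = 0 ∧
              ¬(PySem.Int.band (2 ^ (0 : Nat)) i ≠ 0 ∧ PySem.Int.band (2 ^ (L - 1).toNat) i ≠ 0))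
          then states ++ [i] else states) := by
    funext states i
    split_ifs <;> tauto
  rw [hfun, PySem.List.foldl_append_ite_eq_filter, List.nil_append]
  have hmap : List.map (fun (k : Nat) => (k : Int)) (List.range (2 ^ L.toNat))
      = List.map Int.ofNat (List.range (2 ^ L.toNat)) := rfl
  rw [hmap, List.filter_map]
  unfold pvT
  rw [List.filter_filter]
  congr 1
  apply List.filter_congr
  intro x _
  simp only [Function.comp]
  have e1 : ((Int.ofNat x) >>> (1 : Nat)) = (Int.ofNat (x >>> 1)) := rfl
  have e2 : PySem.Int.band (Int.ofNat x) (Int.ofNat (x >>> 1)) = ((x &&& (x >>> 1) : Nat) : Int) :=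
    PySem.Int.band_natCast x (x >>> 1)
  have e3 : PySem.Int.band ((2 : Int) ^ (0 : Nat)) (Int.ofNat x) ≠ 0 ↔ x.testBit 0 = true :=
    pv_band_pow_ne x 0
  have e4 := pv_band_pow_ne x (L - 1).toNat
  rw [show ((x : Nat) : Int) = Int.ofNat x from rfl] at e4
  cases h0 : x.testBit 0 <;> cases hm : x.testBit (L - 1).toNat <;>
    cases hf : pvFibb x <;>
    · rw [e1, e2]
      unfold pvFibb at hf
      simp_all [Int.natCast_eq_zero, beq_iff_eq]

theorem pv_band_pow_ne_r (x k : Nat) :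
    (PySem.Int.band ((x : Nat) : Int) (((2 ^ k : Nat) : Nat) : Int)) ≠ 0 ↔ x.testBit k = true := by
  rw [PySem.Int.band_natCast, ne_eq, Int.natCast_eq_zero, Nat.and_two_pow]
  cases hb : x.testBit k <;> simp [hb, Nat.pos_iff_ne_zero, Nat.two_pow_pos]

theorem pvLoop (m : Nat) (hm : 1 ≤ m) :
    (PySem.List.pyRange 2 ((m : Int) + 1) 1).foldl
      (fun (pc : List Int × List Int) n =>
        (pc.2, pc.2 ++ pc.1.map (fun x => x + (1 : Int) <<< (n - 1).toNat))) ([0], [0, 1])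
      = ((pvT (m - 1)).map Int.ofNat, (pvT m).map Int.ofNat) := by
  induction m, hm using Nat.le_induction with
  | base =>
    rw [show ((1 : Nat) : Int) + 1 = 2 by norm_num, PySem.List.pyRange_one_eq_nil (le_refl 2)]
    have h0 : pvT 0 = [0] := by decide
    have h1 : pvT 1 = [0, 1] := by decide
    simp [h0, h1]
  | succ m hm ih =>
    have hcast : ((m + 1 : Nat) : Int) + 1 = ((m : Int) + 1) + 1 := by push_cast; ring
    rw [hcast, PySem.List.pyRange_one_succ_right (by omega), List.foldl_append, ih]
    simp only [List.foldl_cons, List.foldl_nil]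
    have ht : ((m : Int) + 1 - 1).toNat = m := by omega
    have hrec : pvT (m + 1) = pvT m ++ (pvT (m - 1)).map (fun x => x + 2 ^ m) := by
      have := pvT_rec (m - 1)
      rw [show m - 1 + 2 = m + 1 by omega, show m - 1 + 1 = m by omega] at this
      exact this
    rw [ht, Int.shiftLeft_natCast_right, pv_shl_one]
    have hfst : m + 1 - 1 = m := by omega
    rw [hfst, hrec, List.map_append, List.map_map, List.map_map]
    refine Prod.ext rfl ?_
    congr 1
    all_goals funext x

theorem pvB_char (L : Int) (pbc : Bool) (hL : 0 ≤ L) :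
    fibonacci_basis_alt L pbc =
      ((pvT L.toNat).filter
        (fun x => !(x.testBit 0 && x.testBit (L - 1).toNat))).map Int.ofNat := by
  by_cases h0 : L = 0
  · subst h0
    unfold fibonacci_basis_alt
    decide
  · have hm1 : 1 ≤ L.toNat := by omega
    unfold fibonacci_basis_alt
    rw [if_neg h0]
    have hcast : L + 1 = ((L.toNat : Int) + 1) := by omega
    rw [hcast, pvLoop L.toNat hm1]
    rw [pv_shl_one]
    rw [List.filter_map]
    congr 1
    apply List.filter_congr
    intro x _
    simp only [Function.comp]
    have e1 : PySem.Int.band (Int.ofNat x) 1 ≠ 0 ↔ x.testBit 0 = true := by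
      have := pv_band_pow_ne_r x 0
      simpa using this
    have e2 := pv_band_pow_ne_r x (L - 1).toNat
    cases h0' : x.testBit 0 <;> cases hm' : x.testBit (L - 1).toNat <;> simp_all

-- ===== VERDICT (by name: the statement is the Claim_ definition above) =====
theorem fibonacci_basis_spec : Claim_equal_fibonacci_basis := by
  intro L pbc _ hPre
  unfold Spec_fibonacci_basis
  rw [pvA_char L pbc hPre, pvB_char L pbc hPre]
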